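-- pv_equiv track=rewrite | github.com/faustind/advent_of_code_2020 | day10/main.py | count_diff
-- ===== SOURCE A (Python) =====
-- def count_diff(arr):
--     c1, c3 = 0, 0
--     for (e1, e2) in zip(arr, arr[1:]):
--         if e2 - e1 == 1:
--             c1 += 1
--         if e2 - e1 == 3:
--             c3 += 1
--     return c1 * c3
-- ===== SOURCE B (Python) =====
-- def count_diff(arr):
--     def cnt(xs, d):
--         n = len(xs)
--         if n < 2:
--             return 0
--         if n == 2:
--             return 1 if xs[1] - xs[0] == d else 0
--         m = n // 2
--         return cnt(xs[:m + 1], d) + cnt(xs[m:], d)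
--     return cnt(arr, 1) * cnt(arr, 3)
-- ===== Notes on version B (the rewrite author's own statement) =====
-- stated objective: alternative
-- what changed: B replaces A's single fused zip-loop with two mutable counters by a divide-and-conquer helper that splits the list at the midpoint (overlapping by one element so the boundary pair is kept) and counts one target difference per call, invoked once for diff 1 and once for diff 3.
import Mathlib
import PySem

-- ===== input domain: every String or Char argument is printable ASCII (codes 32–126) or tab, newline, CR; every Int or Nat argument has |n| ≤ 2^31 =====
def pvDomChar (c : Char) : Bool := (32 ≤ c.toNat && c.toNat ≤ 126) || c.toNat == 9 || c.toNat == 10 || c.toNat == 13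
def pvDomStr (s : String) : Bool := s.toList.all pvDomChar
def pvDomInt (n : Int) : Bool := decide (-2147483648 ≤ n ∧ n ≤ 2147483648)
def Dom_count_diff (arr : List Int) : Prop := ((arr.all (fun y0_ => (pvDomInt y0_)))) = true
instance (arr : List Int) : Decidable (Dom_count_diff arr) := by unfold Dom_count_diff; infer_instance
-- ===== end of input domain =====

-- B replaces A's fused zip-loop with two counters by a divide-and-conquer helper (split at the midpoint, overlapping by one element) counting one target difference per call, invoked for 1 and for 3.

-- ===== PORT A =====
-- for (e1,e2) in zip(arr, arr[1:]): two counters updated by independent ifs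
def count_diff (arr : List Int) : Int :=
  let pairs := arr.zip (PySem.List.slice arr (some 1) none)
  let cs := pairs.foldl (fun (c : Int × Int) p =>
    let c1 := if p.2 - p.1 == 1 then c.1 + 1 else c.1
    let c3 := if p.2 - p.1 == 3 then c.2 + 1 else c.2
    (c1, c3)) (0, 0)
  cs.1 * cs.2

-- ===== PORT B =====
-- cnt(xs, d): 0 if n < 2; the single pair if n == 2; else split at m = n // 2
-- with one element of overlap (xs[:m+1], xs[m:]) and add the two halves' counts.
def cntDC : List Int → Int → Int
  | [], _ => 0
  | [_], _ => 0
  | [a, b], d => if b - a == d then 1 else 0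
  | x :: y :: z :: t, d =>
    let xs := x :: y :: z :: t
    let m : Nat := xs.length / 2
    cntDC (PySem.List.slice xs none (some ((m + 1 : Nat) : Int))) d
      + cntDC (PySem.List.slice xs (some ((m : Nat) : Int)) none) d
  termination_by xs _ => xs.length
  decreasing_by
  · rw [PySem.List.slice_to_natCast]; simp; omega
  · rw [PySem.List.slice_from_natCast]; simp; omega

def count_diff_alt (arr : List Int) : Int :=
  cntDC arr 1 * cntDC arr 3

-- ===== PRECONDITION & SPEC =====
def Spec_count_diff (arr : List Int) (out : Int) : Prop := out = count_diff_alt arr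
instance (arr : List Int) (out : Int) : Decidable (Spec_count_diff arr out) := by unfold Spec_count_diff; infer_instance

-- ===== CLAIM (what is proved, stated in full; the proofs are below) =====
def Claim_equal_count_diff : Prop := ∀ (arr : List Int), Dom_count_diff arr → Spec_count_diff arr (count_diff arr)

-- ===== LEMMAS AND PROOFS =====

-- linear adjacent-difference counter: the common characterisation of both ports
def adjCount : List Int → Int → Int
  | a :: b :: t, d => (if b - a == d then 1 else 0) + adjCount (b :: t) d
  | _, _ => 0

theorem adjCount_append (l : List Int) (a x : Int) (r : List Int) (d : Int) :
    adjCount (a :: l ++ x :: r) d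
      = adjCount (a :: l ++ [x]) d + adjCount (x :: r) d := by
  induction l generalizing a with
  | nil =>
    show adjCount (a :: x :: r) d = adjCount [a, x] d + adjCount (x :: r) d
    simp only [adjCount]
    ring
  | cons b l ih =>
    show adjCount (a :: b :: (l ++ x :: r)) d
        = adjCount (a :: b :: (l ++ [x])) d + adjCount (x :: r) d
    simp only [adjCount]
    rw [show (b :: (l ++ x :: r)) = (b :: l ++ x :: r) from rfl, ih b]
    simp only [List.cons_append]
    ring

theorem adjCount_split (xs : List Int) (m : Nat) (hm : 1 ≤ m) (hlt : m < xs.length) (d : Int) :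
    adjCount xs d = adjCount (xs.take (m + 1)) d + adjCount (xs.drop m) d := by
  obtain ⟨x, r, hx⟩ : ∃ x r, xs.drop m = x :: r := by
    cases h : xs.drop m with
    | nil => exfalso; have := List.length_drop (l := xs) (i := m); rw [h] at this; simp at this; omega
    | cons x r => exact ⟨x, r, rfl⟩
  have htake : xs.take (m + 1) = xs.take m ++ [x] := by
    have : xs.take (m + 1) = xs.take m ++ (xs.drop m).take 1 := by
      rw [← List.take_add]
    rw [this, hx]; simp
  obtain ⟨a, l, hl⟩ : ∃ a l, xs.take m = a :: l := by
    cases h : xs.take m with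
    | nil => exfalso; have := List.length_take (i := m) (l := xs); rw [h] at this; simp at this; omega
    | cons a l => exact ⟨a, l, rfl⟩
  have hxs : xs = a :: l ++ x :: r := by
    conv_lhs => rw [← List.take_append_drop m xs, hl, hx]
    try simp
  rw [htake, hx, hl, hxs, adjCount_append]
  try simp

theorem cntDC_eq_adjCount (xs : List Int) (d : Int) : cntDC xs d = adjCount xs d := by
  fun_induction cntDC xs d
  case case5 z t d xs m ih1 ih2 =>
    rw [PySem.List.slice_to_natCast] at ih1
    rw [PySem.List.slice_from_natCast] at ih2
    rw [PySem.List.slice_to_natCast, PySem.List.slice_from_natCast, ih1, ih2]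
    have hlen : xs.length = t.length + 3 := rfl
    have hm : m = (t.length + 3) / 2 := by
      rw [show m = xs.length / 2 from rfl, hlen]
    exact (adjCount_split xs m (by omega) (by omega) d).symm
  all_goals try rfl
  all_goals try simp_all [adjCount]

theorem count_diff_fold (xs : List Int) (a c1 c3 : Int) :
    ((a :: xs).zip xs).foldl (fun (c : Int × Int) p =>
      let c1 := if p.2 - p.1 == 1 then c.1 + 1 else c.1
      let c3 := if p.2 - p.1 == 3 then c.2 + 1 else c.2
      (c1, c3)) (c1, c3)
    = (c1 + adjCount (a :: xs) 1, c3 + adjCount (a :: xs) 3) := by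
  induction xs generalizing a c1 c3 with
  | nil => simp [adjCount]
  | cons b t ih =>
    simp only [List.zip_cons_cons, List.foldl_cons, ih, adjCount]
    by_cases h1 : b - a = 1 <;> by_cases h3 : b - a = 3 <;>
      simp [h1, h3, Prod.ext_iff] <;> omega

theorem slice_one_tail (xs : List Int) :
    PySem.List.slice xs (some 1) none = xs.tail := by
  cases xs with
  | nil => simp [PySem.List.slice]
  | cons a t => simp [PySem.List.slice_from]

-- ===== VERDICT (by name: the statement is the Claim_ definition above) =====
theorem count_diff_spec : Claim_equal_count_diff := by
  intro arr _
  unfold Spec_count_diff count_diff count_diff_alt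
  cases arr with
  | nil => simp [cntDC]
  | cons a t =>
    simp only [slice_one_tail, List.tail_cons, count_diff_fold, cntDC_eq_adjCount]
    ring
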